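-- pv_equiv track=rewrite | github.com/ccc612/problem_solving | topcoder/FriendScore.py | highestScore
-- ===== SOURCE A (Python) =====
-- def highestScore(friends):
--     hScore = 0
--     Len = len(friends)
--     for i in range(Len):
--         friend_2 = list(friends[i])
--         for j in range(Len):
--             if friend_2[j] == 'N' and j != i:
--                 for k in range(Len):
--                     if friends[k][i] == 'Y' and friends[k][j] == 'Y':
--                         friend_2[j] = 'Y'
--         hScore = max(hScore, "".join(friend_2).count('Y'))
--     return hScore
-- ===== SOURCE B (Python) =====
-- def highestScore(friends):
--     # Set-based: union the adjacency rows of i's friends instead of scanning all k per non-friend j.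
--     n = len(friends)
--     best = 0
--     for i in range(n):
--         row = friends[i]
--         reach = set()
--         for k in range(n):
--             if friends[k][i] == 'Y':
--                 for j in range(n):
--                     if friends[k][j] == 'Y':
--                         reach.add(j)
--         extra = sum(1 for j in range(n) if j != i and row[j] == 'N' and j in reach)
--         best = max(best, row.count('Y') + extra)
--     return best
-- ===== Notes on version B (the rewrite author's own statement) =====
-- stated objective: alternative
-- what changed: Instead of A's in-place row mutation that, for every non-friend j, scans all k for a common friend, B builds the reachable set once per person as the union of the adjacency rows of i's friends and counts direct friends plus newly reachable ones.
import Mathlib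
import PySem

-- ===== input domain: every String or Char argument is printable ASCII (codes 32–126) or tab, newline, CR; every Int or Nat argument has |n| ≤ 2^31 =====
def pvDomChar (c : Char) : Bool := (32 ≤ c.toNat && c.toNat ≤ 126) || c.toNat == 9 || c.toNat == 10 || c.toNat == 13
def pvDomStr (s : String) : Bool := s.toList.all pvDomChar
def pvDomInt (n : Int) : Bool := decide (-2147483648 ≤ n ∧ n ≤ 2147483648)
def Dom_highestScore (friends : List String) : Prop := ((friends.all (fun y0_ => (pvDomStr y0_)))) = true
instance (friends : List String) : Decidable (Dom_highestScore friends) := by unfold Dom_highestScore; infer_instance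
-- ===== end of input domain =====

-- B replaces A's per-(i,j) inner scan over k by one reachable-set union per person (alternative decomposition, same asymptotic cost).

-- B replaces A's per-(i,j) inner scan over k by one reachable-set union per person (alternative decomposition, same asymptotic cost).

-- ===== PORT A =====
-- row access friends[i] as a char list; the default is unreachable under Pre_ (index in range there)
def pvRow (friends : List String) (i : Int) : List Char :=
  ((PySem.List.pyGet? friends i).getD "").toList
def pvCh (friends : List String) (k i : Int) : Char :=
  PySem.List.pyGetD (pvRow friends k) i ' '

-- "".join(friend_2).count('Y') is the element count: every joined element is a single char
def highestScore (friends : List String) : Int :=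
  let Len : Int := friends.length
  (PySem.List.pyRange 0 Len 1).foldl
    (fun hScore i =>
      let friend_2 :=
        (PySem.List.pyRange 0 Len 1).foldl
          (fun f2 j =>
            if PySem.List.pyGetD f2 j ' ' = 'N' ∧ j ≠ i then
              (PySem.List.pyRange 0 Len 1).foldl
                (fun f2' k =>
                  if pvCh friends k i = 'Y' ∧ pvCh friends k j = 'Y' then
                    PySem.List.pySetD f2' j 'Y'
                  else f2') f2
            else f2)
          (pvRow friends i)
      max hScore (friend_2.count 'Y' : Int))
    0

-- ===== PORT B =====
def highestScore_alt (friends : List String) : Int :=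
  let n : Int := friends.length
  (PySem.List.pyRange 0 n 1).foldl
    (fun best i =>
      let row := pvRow friends i
      let reach : PySem.Set Int :=
        (PySem.List.pyRange 0 n 1).foldl
          (fun r k =>
            if pvCh friends k i = 'Y' then
              (PySem.List.pyRange 0 n 1).foldl
                (fun r' j => if pvCh friends k j = 'Y' then PySem.Set.add r' j else r') r
            else r)
          PySem.Set.empty
      let extra : Int :=
        (((PySem.List.pyRange 0 n 1).countP
          (fun j => decide (j ≠ i) && decide (PySem.List.pyGetD row j ' ' = 'N') && PySem.Set.contains reach j)) : Int)
      max best ((row.count 'Y' : Int) + extra))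
    0


-- ===== PRECONDITION & SPEC =====
-- Pre_: exactly the inputs on which Python A returns: A indexes every row at all positions < len(friends),
-- so each row must be at least that long; on shorter rows A raises IndexError.
def Pre_highestScore (friends : List String) : Prop :=
  ∀ s ∈ friends, friends.length ≤ s.toList.length

instance (friends : List String) : Decidable (Pre_highestScore friends) := by
  unfold Pre_highestScore; infer_instance

def pvWitness_highestScore : List String := ["YNY", "NYN", "YNY"]

def Spec_highestScore (friends : List String) (out : Int) : Prop := out = highestScore_alt friends
instance (friends : List String) (out : Int) : Decidable (Spec_highestScore friends out) := by unfold Spec_highestScore; infer_instance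

-- ===== CLAIM (what is proved, stated in full; the proofs are below) =====
def Claim_equal_highestScore : Prop := ∀ (friends : List String), Dom_highestScore friends → Pre_highestScore friends → Spec_highestScore friends (highestScore friends)

-- ===== LEMMAS AND PROOFS =====

theorem pvKfold (fr : List String) (i j : Int) (hj : 0 ≤ j) (f2 : List Char) (ks : List Int) :
    ks.foldl
      (fun f2' k =>
        if pvCh fr k i = 'Y' ∧ pvCh fr k j = 'Y' then PySem.List.pySetD f2' j 'Y' else f2') f2
    = if ks.any (fun k => decide (pvCh fr k i = 'Y') && decide (pvCh fr k j = 'Y')) then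
        PySem.List.pySetD f2 j 'Y'
      else f2 := by
  induction ks generalizing f2 with
  | nil => simp
  | cons k ks ih =>
    by_cases h : pvCh fr k i = 'Y' ∧ pvCh fr k j = 'Y'
    · simp only [List.foldl_cons, List.any_cons, h.1, h.2, decide_true, Bool.true_and,
        Bool.true_or, if_true, ih]
      split
      · simp [PySem.List.pySetD_of_nonneg _ _ hj, List.set_set]
      · rfl
    · have h' : ¬ (decide (pvCh fr k i = 'Y') && decide (pvCh fr k j = 'Y')) = true := by
        simpa using h
      simp only [List.foldl_cons, List.any_cons, if_neg h, ih, Bool.or_eq_true]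
      simp [h']

def pvAnyK (fr : List String) (i j : Int) : Bool :=
  (PySem.List.pyRange 0 (fr.length : Int) 1).any
    (fun k => decide (pvCh fr k i = 'Y') && decide (pvCh fr k j = 'Y'))
def pvStep (fr : List String) (i : Int) (f2 : List Char) (j : Int) : List Char :=
  if PySem.List.pyGetD f2 j ' ' = 'N' ∧ j ≠ i then
    (if pvAnyK fr i j then PySem.List.pySetD f2 j 'Y' else f2) else f2
def pvJ (fr : List String) (i : Int) (row : List Char) (m : Nat) : List Char :=
  (PySem.List.pyRange 0 (m : Int) 1).foldl (pvStep fr i) row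
def pvCond (fr : List String) (i : Int) (row : List Char) (t : Nat) : Bool :=
  decide (row.getD t ' ' = 'N') && decide ((t : Int) ≠ i) && pvAnyK fr i t

theorem pvJ_succ (fr : List String) (i : Int) (row : List Char) (m : Nat) :
    pvJ fr i row (m + 1) = pvStep fr i (pvJ fr i row m) m := by
  unfold pvJ
  have : ((m + 1 : Nat) : Int) = (m : Int) + 1 := by push_cast; ring
  rw [this, PySem.List.pyRange_one_succ_right (by positivity), List.foldl_append]
  simp

theorem pvJ_spec (fr : List String) (i : Int) (row : List Char) (m : Nat) :
    (pvJ fr i row m).length = row.length ∧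
    (∀ t : Nat, (pvJ fr i row m).getD t ' ' =
      if t < m ∧ pvCond fr i row t then 'Y' else row.getD t ' ') ∧
    (pvJ fr i row m).count 'Y' = row.count 'Y' + (List.range m).countP (pvCond fr i row) := by
  induction m with
  | zero => simp [pvJ, PySem.List.pyRange_one_eq_nil]
  | succ m ih =>
    obtain ⟨hlen, hget, hcnt⟩ := ih
    rw [pvJ_succ]
    have hm : (pvJ fr i row m).getD m ' ' = row.getD m ' ' := by
      rw [hget m]; simp
    have hpg : PySem.List.pyGetD (pvJ fr i row m) ((m : Nat) : Int) ' ' = row.getD m ' ' := by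
      rw [PySem.List.pyGetD_natCast]; exact hm
    by_cases hc : pvCond fr i row m
    · have hc' := hc
      unfold pvCond at hc'
      simp only [Bool.and_eq_true, decide_eq_true_eq] at hc'
      obtain ⟨⟨hN, hne⟩, hany⟩ := hc'
      have hmlt : m < row.length := by
        by_contra h
        rw [List.getD_eq_default _ _ (by omega)] at hN
        exact absurd hN (by decide)
      have hmlt' : m < (pvJ fr i row m).length := by omega
      have hstep : pvStep fr i (pvJ fr i row m) (m : Int) = (pvJ fr i row m).set m 'Y' := by
        unfold pvStep
        simp only [hpg]
        rw [if_pos ⟨hN, hne⟩, if_pos hany]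
        simp
      rw [hstep]
      refine ⟨by simp [hlen], ?_, ?_⟩
      · intro t
        by_cases ht : t = m
        · subst ht
          rw [List.getD_eq_getElem _ _ (by simpa using hmlt'), List.getElem_set_self]
          simp [hc]
        · have heq : ((pvJ fr i row m).set m 'Y').getD t ' ' = (pvJ fr i row m).getD t ' ' := by
            simp [List.getD_eq_getElem?_getD, List.getElem?_set_ne (by omega : m ≠ t)]
          rw [heq, hget t]
          by_cases htm : t < m
          · have h2 : t < m + 1 := by omega
            simp [htm, h2]
          · have h2 : ¬ (t < m + 1) := by omega
            simp [htm, h2]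
      · rw [List.count_set hmlt']
        have hgm : (pvJ fr i row m)[m] = 'N' := by
          rw [← List.getD_eq_getElem _ ' ' hmlt', hm]; exact hN
        rw [hgm]
        simp only [show ('N' == 'Y') = false by decide, show ('Y' == 'Y') = true by decide, if_true]
        rw [hcnt, List.range_succ, List.countP_append]
        simp [hc]
        omega
    · have hstep : pvStep fr i (pvJ fr i row m) (m : Int) = pvJ fr i row m := by
        unfold pvStep
        simp only [hpg]
        unfold pvCond at hc
        simp only [Bool.and_eq_true, decide_eq_true_eq, not_and] at hc
        by_cases h1 : row.getD m ' ' = 'N'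
        · by_cases h2 : ((m : Nat) : Int) ≠ i
          · rw [if_pos ⟨h1, h2⟩, if_neg (by simpa using hc ⟨h1, h2⟩)]
          · rw [if_neg (fun h => h2 h.2)]
        · rw [if_neg (fun h => h1 h.1)]
      rw [hstep]
      refine ⟨hlen, ?_, ?_⟩
      · intro t
        rw [hget t]
        by_cases ht : t = m
        · subst ht; simp [hc]
        · have : (t < m ∧ pvCond fr i row t = true) ↔ (t < m + 1 ∧ pvCond fr i row t = true) := by
            constructor
            · rintro ⟨h, h'⟩; exact ⟨by omega, h'⟩
            · rintro ⟨h, h'⟩; exact ⟨by omega, h'⟩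
          simp only [this]
      · rw [hcnt, List.range_succ, List.countP_append]
        simp [hc]

theorem pvReachInner (fr : List String) (k : Int) (r : PySem.Set Int) (js : List Int) (x : Int) :
    x ∈ js.foldl (fun r' j => if pvCh fr k j = 'Y' then PySem.Set.add r' j else r') r ↔
      x ∈ r ∨ (x ∈ js ∧ pvCh fr k x = 'Y') := by
  induction js generalizing r with
  | nil => simp
  | cons j js ih =>
    by_cases h : pvCh fr k j = 'Y'
    · simp only [List.foldl_cons, if_pos h, ih, PySem.Set.mem_add, List.mem_cons]
      constructor
      · rintro (⟨hx | rfl⟩ | ⟨hj, hY⟩)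
        · exact Or.inl hx
        · exact Or.inr ⟨Or.inl rfl, h⟩
        · exact Or.inr ⟨Or.inr hj, hY⟩
      · rintro (hx | ⟨(rfl | hj), hY⟩)
        · exact Or.inl (Or.inl hx)
        · exact Or.inl (Or.inr rfl)
        · exact Or.inr ⟨hj, hY⟩
    · simp only [List.foldl_cons, if_neg h, ih, List.mem_cons]
      constructor
      · rintro (hx | ⟨hj, hY⟩)
        · exact Or.inl hx
        · exact Or.inr ⟨Or.inr hj, hY⟩
      · rintro (hx | ⟨(rfl | hj), hY⟩)
        · exact Or.inl hx
        · exact absurd hY h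
        · exact Or.inr ⟨hj, hY⟩

theorem pvReachOuter (fr : List String) (i : Int) (js : List Int) (r0 : PySem.Set Int)
    (ks : List Int) (x : Int) :
    x ∈ ks.foldl
        (fun r k =>
          if pvCh fr k i = 'Y' then
            js.foldl (fun r' j => if pvCh fr k j = 'Y' then PySem.Set.add r' j else r') r
          else r) r0 ↔
      x ∈ r0 ∨ ∃ k ∈ ks, pvCh fr k i = 'Y' ∧ x ∈ js ∧ pvCh fr k x = 'Y' := by
  induction ks generalizing r0 with
  | nil => simp
  | cons k ks ih =>
    by_cases h : pvCh fr k i = 'Y'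
    · simp only [List.foldl_cons, if_pos h, ih, pvReachInner, List.mem_cons]
      constructor
      · rintro ((hx | ⟨hj, hY⟩) | ⟨k', hk', h1, h2⟩)
        · exact Or.inl hx
        · exact Or.inr ⟨k, Or.inl rfl, h, hj, hY⟩
        · exact Or.inr ⟨k', Or.inr hk', h1, h2⟩
      · rintro (hx | ⟨k', (rfl | hk'), h1, h2⟩)
        · exact Or.inl (Or.inl hx)
        · exact Or.inl (Or.inr h2)
        · exact Or.inr ⟨k', hk', h1, h2⟩
    · simp only [List.foldl_cons, if_neg h, ih, List.mem_cons]
      constructor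
      · rintro (hx | ⟨k', hk', h1, h2⟩)
        · exact Or.inl hx
        · exact Or.inr ⟨k', Or.inr hk', h1, h2⟩
      · rintro (hx | ⟨k', (rfl | hk'), h1, h2⟩)
        · exact Or.inl hx
        · exact absurd h1 h
        · exact Or.inr ⟨k', hk', h1, h2⟩

theorem pvScore (fr : List String) (i : Int) :
    ((PySem.List.pyRange 0 (fr.length : Int) 1).foldl
        (fun f2 j =>
          if PySem.List.pyGetD f2 j ' ' = 'N' ∧ j ≠ i then
            (PySem.List.pyRange 0 (fr.length : Int) 1).foldl
              (fun f2' k =>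
                if pvCh fr k i = 'Y' ∧ pvCh fr k j = 'Y' then
                  PySem.List.pySetD f2' j 'Y'
                else f2') f2
          else f2) (pvRow fr i)).count 'Y'
    = (pvRow fr i).count 'Y' + (List.range fr.length).countP (pvCond fr i (pvRow fr i)) := by
  have hstep : (PySem.List.pyRange 0 (fr.length : Int) 1).foldl
      (fun f2 j =>
        if PySem.List.pyGetD f2 j ' ' = 'N' ∧ j ≠ i then
          (PySem.List.pyRange 0 (fr.length : Int) 1).foldl
            (fun f2' k =>
              if pvCh fr k i = 'Y' ∧ pvCh fr k j = 'Y' then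
                PySem.List.pySetD f2' j 'Y'
              else f2') f2
        else f2) (pvRow fr i) = pvJ fr i (pvRow fr i) fr.length := by
    unfold pvJ
    apply PySem.List.foldl_congr_mem
    intro f2 j hj
    have hj0 : 0 ≤ j := ((PySem.List.mem_pyRange_one).1 hj).1
    unfold pvStep
    rw [pvKfold fr i j hj0]
    rfl
  rw [hstep, (pvJ_spec fr i (pvRow fr i) fr.length).2.2]

theorem pvExtraGen (fr : List String) (i : Int) (R : PySem.Set Int)
    (hR : ∀ x, x ∈ R ↔ ((0 ≤ x ∧ x < (fr.length : Int)) ∧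
        ∃ k, (0 ≤ k ∧ k < (fr.length : Int)) ∧ pvCh fr k i = 'Y' ∧ pvCh fr k x = 'Y')) :
    List.countP
      (fun j => decide (j ≠ i) && decide (PySem.List.pyGetD (pvRow fr i) j ' ' = 'N') &&
        PySem.Set.contains R j)
      (PySem.List.pyRange 0 (fr.length : Int) 1)
    = (List.range fr.length).countP (pvCond fr i (pvRow fr i)) := by
  rw [PySem.List.pyRange_zero_nat, List.countP_map]
  apply List.countP_congr
  intro t ht
  have htn : t < fr.length := List.mem_range.1 ht
  simp only [Function.comp]
  unfold pvCond
  simp only [Bool.and_eq_true, decide_eq_true_eq]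
  rw [PySem.Set.contains_iff, hR]
  constructor
  · rintro ⟨⟨hne, hN⟩, _, k, ⟨hk0, hkn⟩, h1, h2⟩
    refine ⟨⟨by rwa [PySem.List.pyGetD_natCast] at hN, hne⟩, ?_⟩
    unfold pvAnyK
    rw [List.any_eq_true]
    exact ⟨k, by rw [PySem.List.mem_pyRange_one]; exact ⟨hk0, hkn⟩, by simp [h1, h2]⟩
  · rintro ⟨⟨hN, hne⟩, hany⟩
    unfold pvAnyK at hany
    rw [List.any_eq_true] at hany
    obtain ⟨k, hk, hkY⟩ := hany
    rw [PySem.List.mem_pyRange_one] at hk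
    simp only [Bool.and_eq_true, decide_eq_true_eq] at hkY
    exact ⟨⟨hne, by rwa [PySem.List.pyGetD_natCast]⟩,
      ⟨⟨by positivity, by exact_mod_cast htn⟩, k, hk, hkY.1, hkY.2⟩⟩

theorem pvMain (fr : List String) : highestScore fr = highestScore_alt fr := by
  unfold highestScore highestScore_alt
  apply PySem.List.foldl_congr_mem
  intro acc i hi
  dsimp only
  rw [pvScore fr i]
  have hmem : ∀ x, x ∈ (PySem.List.pyRange 0 (fr.length : Int) 1).foldl
      (fun r k =>
        if pvCh fr k i = 'Y' then
          (PySem.List.pyRange 0 (fr.length : Int) 1).foldl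
            (fun r' j => if pvCh fr k j = 'Y' then PySem.Set.add r' j else r') r
        else r)
      PySem.Set.empty ↔ ((0 ≤ x ∧ x < (fr.length : Int)) ∧
        ∃ k, (0 ≤ k ∧ k < (fr.length : Int)) ∧ pvCh fr k i = 'Y' ∧ pvCh fr k x = 'Y') := by
    intro x
    rw [pvReachOuter]
    simp only [PySem.List.mem_pyRange_one, PySem.Set.empty]
    constructor
    · rintro (h | ⟨k, hk, h1, h2, h3⟩)
      · simp at h
      · exact ⟨h2, k, hk, h1, h3⟩
    · rintro ⟨hx, k, hk, h1, h2⟩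
      exact Or.inr ⟨k, hk, h1, hx, h2⟩
  rw [pvExtraGen fr i _ hmem]
  push_cast
  ring_nf

-- ===== VERDICT (by name: the statement is the Claim_ definition above) =====
theorem highestScore_spec : Claim_equal_highestScore := by
  intro friends _ _
  unfold Spec_highestScore
  exact pvMain friends
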